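-- pv_equiv track=rewrite | github.com/KwonJuHwan/CodingTest | Programmers_Level_2/n2 배열 자르기.py | solution
-- ===== SOURCE A (Python) =====
-- def solution(n, left, right):
--     answer = []
--     y_left = left // n + 1
--     x_left = left % n
--     i = left
--     while i <= right:
--         # 2
--         y = i // n + 1
--         x = i % n
--         for j in range(n):
--             if i > right:
--                 break
--             if x <= j:
--                 if j < y:
--                     answer.append(y)
--                 else:
--                     answer.append(j + 1)
--                 i += 1
--
--     return answer
-- ===== SOURCE B (Python) =====
-- def solution(n, left, right):
--     return [max(i // n, i % n) + 1 for i in range(left, right + 1)]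
-- ===== Notes on version B (the rewrite author's own statement) =====
-- stated objective: simpler
-- what changed: B replaces A's while-loop over rows with an inner column scan and a counter synchronized to columns by a single comprehension over the flat index range using the closed form max(i//n, i%n)+1.
import Mathlib
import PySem

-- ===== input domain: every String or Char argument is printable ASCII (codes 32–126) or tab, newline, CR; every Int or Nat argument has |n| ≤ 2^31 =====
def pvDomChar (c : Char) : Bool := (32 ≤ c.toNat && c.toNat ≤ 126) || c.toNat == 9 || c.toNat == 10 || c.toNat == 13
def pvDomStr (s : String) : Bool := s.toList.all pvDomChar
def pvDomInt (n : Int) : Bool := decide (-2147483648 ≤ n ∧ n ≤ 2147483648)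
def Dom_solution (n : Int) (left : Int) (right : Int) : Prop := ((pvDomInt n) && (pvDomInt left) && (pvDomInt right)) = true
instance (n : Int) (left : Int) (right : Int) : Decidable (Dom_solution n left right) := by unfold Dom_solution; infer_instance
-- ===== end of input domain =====

-- B replaces A's row-by-row while-loop (inner column scan, counter synchronized to
-- columns) by one map over the flat index range with the closed form max(i//n,i%n)+1:
-- simpler, same cost.


-- ===== PORT A =====
-- inner 'for j in range(n)' loop as a counter recursion j = 0,1,…,n-1 (Python's range
-- consumed lazily): checks 'i > right: break' first, then 'x <= j' append/increment
def solutionRow (n right x y : Int) (j i : Int) (acc : List Int) : Int × List Int :=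
  if _hj : j < n then
    if right < i then (i, acc)
    else if x ≤ j then
      solutionRow n right x y (j + 1) (i + 1) (acc ++ [if j < y then y else j + 1])
    else solutionRow n right x y (j + 1) i acc
  else (i, acc)
termination_by (n - j).toNat
decreasing_by all_goals omega

-- outer 'while i <= right' loop; fuel only makes the recursion structural: inside
-- Pre_solution each iteration increases i, and (right-left+1).toNat iterations suffice
def solutionLoop (n right : Int) : Nat → Int → List Int → List Int
  | 0, _, acc => acc
  | fuel + 1, i, acc =>
    if i ≤ right then
      let y := PySem.Int.floordiv i n + 1
      let x := PySem.Int.mod i n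
      let p := solutionRow n right x y 0 i acc
      solutionLoop n right fuel p.1 p.2
    else acc

def solution (n : Int) (left : Int) (right : Int) : List Int :=
  -- y_left and x_left are computed in A but never used (ZeroDivisionError at n = 0 is excluded by Pre_)
  solutionLoop n right (right - left + 1).toNat left []

-- ===== PORT B =====
def solution_alt (n : Int) (left : Int) (right : Int) : List Int :=
  (PySem.List.pyRange left (right + 1) 1).map
    (fun i => max (PySem.Int.floordiv i n) (PySem.Int.mod i n) + 1)

-- ===== PRECONDITION & SPEC =====
-- A raises ZeroDivisionError when n = 0, and loops forever when n < 0 with left ≤ right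
-- (the empty inner range never advances i); exactly those inputs are excluded.
def Pre_solution (n : Int) (left : Int) (right : Int) : Prop :=
  1 ≤ n ∨ (n < 0 ∧ right < left)
instance (n : Int) (left : Int) (right : Int) : Decidable (Pre_solution n left right) := by
  unfold Pre_solution; infer_instance

def pvWitness_solution : Int × Int × Int := (3, 2, 5)

def Spec_solution (n : Int) (left : Int) (right : Int) (out : List Int) : Prop := out = solution_alt n left right
instance (n : Int) (left : Int) (right : Int) (out : List Int) : Decidable (Spec_solution n left right out) := by unfold Spec_solution; infer_instance

-- ===== CLAIM (what is proved, stated in full; the proofs are below) =====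
def Claim_equal_solution : Prop := ∀ (n : Int) (left : Int) (right : Int), Dom_solution n left right → Pre_solution n left right → Spec_solution n left right (solution n left right)

-- ===== LEMMAS AND PROOFS =====

-- the flat-index value B computes
def pvF (n i : Int) : Int := max (PySem.Int.floordiv i n) (PySem.Int.mod i n) + 1

theorem pyRange_empty (a b : Int) (h : b ≤ a) : PySem.List.pyRange a b 1 = [] := by
  simp only [PySem.List.pyRange, if_neg (by norm_num : (1:Int) ≠ 0)]
  have : ¬ a < b := by omega
  simp [this]

-- columns 0 ≤ j < x = i % n are skipped without touching the state (no break fires: i ≤ right)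
theorem solutionRow_skip (n right x y : Int) :
    ∀ (k : Nat) (j : Int), (x - j).toNat = k → j ≤ x → x ≤ n →
    ∀ (i : Int), i ≤ right → ∀ (acc : List Int),
    solutionRow n right x y j i acc = solutionRow n right x y x i acc := by
  intro k
  induction k with
  | zero =>
    intro j hk hjx _ i _ acc
    have : j = x := by omega
    rw [this]
  | succ k ih =>
    intro j hk hjx hxn i hi acc
    have hjlt : j < x := by omega
    rw [solutionRow, dif_pos (by omega), if_neg (by omega), if_neg (by omega)]
    exact ih (j + 1) (by omega) (by omega) hxn i hi acc

-- the active part of the row: from column j = i % n on, each kept column appends pvF n i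
theorem solutionRow_active (n right x y : Int) (hn : 1 ≤ n) :
    ∀ (k : Nat) (j i : Int) (acc : List Int),
    (n - j).toNat = k → j ≤ n →
    (n ≤ j ∨ (PySem.Int.mod i n = j ∧ y = PySem.Int.floordiv i n + 1)) →
    x ≤ j → i ≤ right + 1 →
    solutionRow n right x y j i acc
      = (min (right + 1) (i + (n - j)),
         acc ++ (PySem.List.pyRange i (min (right + 1) (i + (n - j))) 1).map (pvF n)) := by
  intro k
  induction k with
  | zero =>
    intro j i acc hk hj _ hx hi
    rw [solutionRow, dif_neg (by omega)]
    have h1 : min (right + 1) (i + (n - j)) = i := by omega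
    rw [h1, pyRange_empty _ _ (le_refl i)]
    simp
  | succ k ih =>
    intro j i acc hk hj hH hx hi
    have hjlt : j < n := by omega
    obtain ⟨hmod, hy⟩ : PySem.Int.mod i n = j ∧ y = PySem.Int.floordiv i n + 1 := by
      rcases hH with h | h
      · omega
      · exact h
    rw [solutionRow, dif_pos hjlt]
    by_cases hbr : right < i
    · rw [if_pos hbr]
      have h1 : min (right + 1) (i + (n - j)) = i := by omega
      rw [h1, pyRange_empty _ _ (le_refl i)]
      simp
    · rw [if_neg hbr, if_pos hx]
      have hval : (if j < y then y else j + 1) = pvF n i := by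
        unfold pvF
        subst hy
        split_ifs with h
        · rw [max_eq_left (by omega)]
        · rw [max_eq_right (by omega), hmod]
      have hH' : n ≤ j + 1 ∨ (PySem.Int.mod (i + 1) n = j + 1 ∧
          y = PySem.Int.floordiv (i + 1) n + 1) := by
        by_cases hj1 : n ≤ j + 1
        · exact Or.inl hj1
        · right
          have hb0 := PySem.Int.mod_nonneg i (b := n) (by omega)
          have hb1 := PySem.Int.mod_lt i (b := n) (by omega)
          have heq := PySem.Int.floordiv_mul_add_mod i n
          have h2 := PySem.Int.floordiv_mul_add_mod (i + 1) n
          have hnn := PySem.Int.mod_nonneg (i + 1) (b := n) (by omega)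
          have hlt2 := PySem.Int.mod_lt (i + 1) (b := n) (by omega)
          -- i+1 stays in the same row (i % n = j, j+1 < n): floordiv (i+1) n = floordiv i n
          have hdiv' : PySem.Int.floordiv (i + 1) n = PySem.Int.floordiv i n := by
            by_contra hne
            rcases lt_or_gt_of_ne hne with h | h
            · nlinarith [mul_le_mul_of_nonneg_right
                (show PySem.Int.floordiv (i + 1) n + 1 ≤ PySem.Int.floordiv i n by linarith)
                (show (0:Int) ≤ n by omega)]
            · nlinarith [mul_le_mul_of_nonneg_right
                (show PySem.Int.floordiv i n + 1 ≤ PySem.Int.floordiv (i + 1) n by linarith)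
                (show (0:Int) ≤ n by omega)]
          rw [hdiv']
          constructor
          · rw [hdiv'] at h2; omega
          · exact hy
      have hrec := ih (j + 1) (i + 1) (acc ++ [if j < y then y else j + 1])
          (by omega) (by omega) hH' (by omega) (by omega)
      rw [hrec]
      have hmin : min (right + 1) (i + 1 + (n - (j + 1))) = min (right + 1) (i + (n - j)) := by
        omega
      rw [hmin, hval]
      have hi' : i < min (right + 1) (i + (n - j)) := by omega
      rw [PySem.List.pyRange_one_cons hi']
      simp

-- full row = skipped columns, then active columns
theorem solutionRow_full (n right i : Int) (hn : 1 ≤ n) (acc : List Int) (hi : i ≤ right) :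
    solutionRow n right (PySem.Int.mod i n) (PySem.Int.floordiv i n + 1) 0 i acc
      = (min (right + 1) (i + (n - PySem.Int.mod i n)),
         acc ++ (PySem.List.pyRange i (min (right + 1) (i + (n - PySem.Int.mod i n))) 1).map (pvF n)) := by
  have hx0 := PySem.Int.mod_nonneg i (b := n) (by omega)
  have hxn := PySem.Int.mod_lt i (b := n) (by omega)
  rw [solutionRow_skip n right (PySem.Int.mod i n) (PySem.Int.floordiv i n + 1)
        (PySem.Int.mod i n).toNat 0 (by omega) (by omega) (by omega) i hi acc,
      solutionRow_active n right (PySem.Int.mod i n) (PySem.Int.floordiv i n + 1) hn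
        (n - PySem.Int.mod i n).toNat (PySem.Int.mod i n) i acc rfl (by omega)
        (Or.inr ⟨rfl, rfl⟩) (le_refl _) (by omega)]

-- the outer loop with enough fuel produces the mapped flat range
theorem solutionLoop_eq (n right : Int) (hn : 1 ≤ n) :
    ∀ (fuel : Nat) (i : Int) (acc : List Int), (right + 1 - i).toNat ≤ fuel →
    solutionLoop n right fuel i acc = acc ++ (PySem.List.pyRange i (right + 1) 1).map (pvF n) := by
  intro fuel
  induction fuel with
  | zero =>
    intro i acc hf
    rw [pyRange_empty _ _ (by omega)]
    simp [solutionLoop]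
  | succ fuel ih =>
    intro i acc hf
    simp only [solutionLoop]
    by_cases hi : i ≤ right
    · rw [if_pos hi]
      rw [solutionRow_full n right i hn acc hi]
      have hx0 := PySem.Int.mod_nonneg i (b := n) (by omega)
      have hxn := PySem.Int.mod_lt i (b := n) (by omega)
      set i' := min (right + 1) (i + (n - PySem.Int.mod i n)) with hi'
      have hii' : i < i' := by omega
      have hle : i' ≤ right + 1 := by omega
      rw [ih i' _ (by omega)]
      rw [List.append_assoc, ← List.map_append,
          ← PySem.List.pyRange_one_append i i' (right + 1) (le_of_lt hii') hle]
    · rw [if_neg hi]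
      rw [pyRange_empty _ _ (by omega)]
      simp

-- ===== VERDICT (by name: the statement is the Claim_ definition above) =====
theorem solution_spec : Claim_equal_solution := by
  intro n left right _ hpre
  unfold Spec_solution solution solution_alt
  rcases hpre with hn | ⟨hn, hrl⟩
  · rw [solutionLoop_eq n right hn _ left [] (by omega)]
    rfl
  · have h0 : (right - left + 1).toNat = 0 := by omega
    rw [h0, pyRange_empty _ _ (by omega)]
    rfl
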